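-- pv_equiv track=rewrite | github.com/orsmith15/CS-122-Algorithms-in-Genomics | Final Project 1C/Final1C.py | hashGenome
-- ===== SOURCE A (Python) =====
-- window_ = 16
--
-- def hashGenome(genome,window = window_):
--     hashDict = {}
--     for i in range(len(genome)-window+1):
--         kmer = genome[i:i+window]
--         if kmer in hashDict:
--             hashDict[kmer] += [i]
--         else:
--             hashDict[kmer] = [i]
--     return hashDict
-- ===== SOURCE B (Python) =====
-- window_ = 16
--
-- def hashGenome(genome, window=window_):
--     # Two-phase: materialise all window substrings once, then for each kmer at
--     # its first occurrence collect every position of that kmer in one scan.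
--     n = len(genome) - window + 1
--     kmers = [genome[i:i + window] for i in range(n)]
--     result = {}
--     for k in kmers:
--         if k not in result:
--             result[k] = [i for i, k2 in enumerate(kmers) if k2 == k]
--     return result
-- ===== Notes on version B (the rewrite author's own statement) =====
-- stated objective: alternative
-- what changed: A builds the dict incrementally, appending each position to its kmer's list as the scan goes; B first materialises the list of all window substrings, then for each kmer at its first occurrence collects all of that kmer's positions with one enumerate-filter scan.
import Mathlib
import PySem

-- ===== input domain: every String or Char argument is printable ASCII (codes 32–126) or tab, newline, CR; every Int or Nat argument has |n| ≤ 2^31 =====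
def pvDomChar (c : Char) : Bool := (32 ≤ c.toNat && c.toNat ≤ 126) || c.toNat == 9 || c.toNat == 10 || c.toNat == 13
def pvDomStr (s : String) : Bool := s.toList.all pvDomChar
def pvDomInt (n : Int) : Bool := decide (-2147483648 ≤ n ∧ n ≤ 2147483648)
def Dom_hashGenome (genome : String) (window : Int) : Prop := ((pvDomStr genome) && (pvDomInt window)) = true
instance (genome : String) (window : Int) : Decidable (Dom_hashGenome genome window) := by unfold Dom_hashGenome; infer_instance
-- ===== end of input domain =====

-- B replaces A's incremental append-to-dict loop by a two-phase plan (materialise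
-- all kmers, then collect each distinct kmer's positions by a scan at its first
-- occurrence); same return value, structurally different (objective: alternative).

-- ===== PORT A =====
def hashGenome (genome : String) (window : Int) : List (String × List Int) :=
  let hashDict :=
    (PySem.List.pyRange 0 ((PySem.Str.len genome : Int) - window + 1)).foldl
      (fun hashDict i =>
        let kmer := PySem.Str.slice genome (some i) (some (i + window))
        if hashDict.contains kmer then
          hashDict.modify kmer [] (· ++ [i])       -- hashDict[kmer] += [i]
        else
          hashDict.insert kmer [i])
      PySem.Dict.empty
  hashDict.items

-- ===== PORT B =====
def hashGenome_alt (genome : String) (window : Int) : List (String × List Int) :=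
  let n : Int := (PySem.Str.len genome : Int) - window + 1
  let kmers := (PySem.List.pyRange 0 n).map
      (fun i => PySem.Str.slice genome (some i) (some (i + window)))
  let result :=
    kmers.foldl
      (fun result k =>
        if result.contains k then result
        else
          result.insert k
            (((PySem.List.enumerate kmers).filter (fun p => p.2 == k)).map (·.1)))
      PySem.Dict.empty
  result.items

-- ===== PRECONDITION & SPEC =====
def Spec_hashGenome (genome : String) (window : Int) (out : List (String × List Int)) : Prop := out = hashGenome_alt genome window
instance (genome : String) (window : Int) (out : List (String × List Int)) : Decidable (Spec_hashGenome genome window out) := by unfold Spec_hashGenome; infer_instance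

-- ===== CLAIM (what is proved, stated in full; the proofs are below) =====
def Claim_equal_hashGenome : Prop := ∀ (genome : String) (window : Int), Dom_hashGenome genome window → Spec_hashGenome genome window (hashGenome genome window)

-- ===== LEMMAS AND PROOFS =====

-- A's branching step is exactly a `modify` with default [].
theorem stepA_eq_modify (d : PySem.Dict String (List Int)) (k : String) (i : Int) :
    (if d.contains k then d.modify k [] (· ++ [i]) else d.insert k [i])
      = d.modify k [] (· ++ [i]) := by
  by_cases h : d.contains k = true
  · simp [h]
  · simp only [Bool.not_eq_true] at h
    simp [h, PySem.Dict.modify, PySem.Dict.getD_of_not_contains _ _ h]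

-- enumerating a comprehension over a range recovers the range indices
theorem enumerate_map_pyRange (f : Int → String) (a b : Int) :
    PySem.List.enumerate ((PySem.List.pyRange a b).map f) a
      = (PySem.List.pyRange a b).map (fun i => (i, f i)) := by
  by_cases hab : a < b
  · have hn : (b - a).toNat ≠ 0 := by omega
    generalize hm : (b - a).toNat = m at hn
    clear hab hn
    induction m generalizing a with
    | zero =>
        rw [PySem.List.pyRange_one_eq_nil (by omega)]
        simp [PySem.List.enumerate_nil]
    | succ m ih =>
        rw [PySem.List.pyRange_one_cons (by omega)]
        simp only [List.map_cons, PySem.List.enumerate_cons]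
        rw [ih (a + 1) (by omega)]
  · rw [PySem.List.pyRange_one_eq_nil (by omega)]
    simp [PySem.List.enumerate_nil]

-- B's loop: skipping already-present keys and inserting `pos k` for fresh ones
-- extends the items list along the ordered dedup of the scanned keys.
theorem foldl_skip_insert (pos : String → List Int) (ks : List String)
    (d : PySem.Dict String (List Int)) (hnd : d.keys.Nodup)
    (hit : d.items = d.keys.map (fun k => (k, pos k))) :
    (ks.foldl (fun d k => if d.contains k then d else d.insert k (pos k)) d).items
      = (PySem.Set.update d.keys ks).map (fun k => (k, pos k)) := by
  induction ks generalizing d with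
  | nil => simpa [PySem.Set.update]
  | cons k ks ih =>
      simp only [List.foldl_cons, PySem.Set.update, PySem.Set.add] at *
      by_cases h : d.contains k = true
      · have hk : k ∈ d.keys := (PySem.Dict.contains_iff_mem_keys d k).mp h
        simp [h, hk, ih d hnd hit]
      · simp only [Bool.not_eq_true] at h
        have hk : k ∉ d.keys := by
          intro hmem
          exact absurd ((PySem.Dict.contains_iff_mem_keys d k).mpr hmem) (by simp [h])
        rw [if_neg (by simpa using h), if_neg (by simpa using hk),
            ← PySem.Dict.keys_insert_of_not_contains d (pos k) h]
        exact ih (d.insert k (pos k))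
          (by rw [PySem.Dict.keys_insert_of_not_contains _ _ h]
              simpa [List.nodup_append] using ⟨hnd, fun a ha hak => hk (hak ▸ ha)⟩)
          (by rw [PySem.Dict.items_insert_of_not_contains _ _ h,
                  PySem.Dict.keys_insert_of_not_contains _ _ h]
              simp [hit])

-- ===== VERDICT (by name: the statement is the Claim_ definition above) =====
theorem hashGenome_spec : Claim_equal_hashGenome := by
  intro genome window _
  unfold Spec_hashGenome hashGenome hashGenome_alt
  set n : Int := (PySem.Str.len genome : Int) - window + 1 with hn
  set f : Int → String := fun i => PySem.Str.slice genome (some i) (some (i + window)) with hf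
  set r := PySem.List.pyRange 0 n with hr
  -- A's side: rewrite the step to a pure modify-fold, then characterise items.
  have hA :
      (r.foldl (fun d i => if d.contains (f i) then d.modify (f i) [] (· ++ [i])
                           else d.insert (f i) [i]) PySem.Dict.empty)
        = ((r.map (fun i => (f i, i))).foldl
            (fun d p => d.modify p.1 [] (· ++ [p.2])) PySem.Dict.empty) := by
    rw [List.foldl_map]
    exact PySem.List.foldl_congr_mem _ _ _ _ (fun d i _ => stepA_eq_modify d (f i) i)
  rw [hA]
  set L := r.map (fun i => (f i, i)) with hL
  set dA := L.foldl (fun d p => d.modify p.1 [] (· ++ [p.2])) PySem.Dict.empty with hdA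
  have hAkeys : dA.keys = PySem.Set.ofList (r.map f) := by
    rw [hdA]
    have := PySem.Dict.keys_foldl_modify_key L (fun p => p.1) []
      (fun _ p v => v ++ [p.2]) PySem.Dict.empty
    simpa [hL, List.map_map, Function.comp, PySem.Set.update_nil_left] using this
  have hAnodup : dA.keys.Nodup := by
    rw [hdA]
    exact PySem.Dict.nodup_keys_foldl_modify_key L (fun p => p.1) []
      (fun _ p v => v ++ [p.2]) PySem.Dict.empty (by simp)
  have hAval : ∀ k, dA.getD k [] = r.filter (fun i => f i == k) := by
    intro k
    rw [hdA]
    have := PySem.Dict.getD_foldl_modify_append L PySem.Dict.empty k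
    simpa [hL, List.filter_map, List.map_map, Function.comp_def] using this
  have hAitems : dA.items
      = (PySem.Set.ofList (r.map f)).map
          (fun k => (k, r.filter (fun i => f i == k))) := by
    rw [PySem.Dict.items_eq_map_keys dA hAnodup [], hAkeys]
    exact List.map_congr_left (fun k _ => by rw [hAval k])
  -- B's side: the skip/insert fold over kmers with the precomputed position lists.
  have hpos : ∀ k,
      ((PySem.List.enumerate (r.map f)).filter (fun p => p.2 == k)).map (·.1)
        = r.filter (fun i => f i == k) := by
    intro k
    rw [show PySem.List.enumerate (r.map f) = PySem.List.enumerate (r.map f) 0 from rfl,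
        hr, enumerate_map_pyRange f 0 n]
    simp [List.filter_map, List.map_map, Function.comp_def]
  have hB :
      ((r.map f).foldl
        (fun d k => if d.contains k then d
          else d.insert k (((PySem.List.enumerate (r.map f)).filter (fun p => p.2 == k)).map (·.1)))
        PySem.Dict.empty).items
      = (PySem.Set.ofList (r.map f)).map
          (fun k => (k, r.filter (fun i => f i == k))) := by
    have hstep :
        ((r.map f).foldl
          (fun d k => if d.contains k then d
            else d.insert k (((PySem.List.enumerate (r.map f)).filter (fun p => p.2 == k)).map (·.1)))
          PySem.Dict.empty)
        = ((r.map f).foldl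
          (fun d k => if d.contains k then d
            else d.insert k (r.filter (fun i => f i == k)))
          PySem.Dict.empty) := by
      exact PySem.List.foldl_congr_mem _ _ _ _ (fun d k _ => by rw [hpos k])
    rw [hstep,
        foldl_skip_insert (fun k => r.filter (fun i => f i == k))
          (r.map f) PySem.Dict.empty (by simp [PySem.Dict.keys_empty]) (by rfl)]
    rw [show (PySem.Dict.empty : PySem.Dict String (List Int)).keys = [] from rfl,
        PySem.Set.update_nil_left]
  rw [hAitems]
  exact hB.symm
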